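-- pv_equiv track=rewrite | github.com/Arsen1302/Code-copy-detector | TestData/solutions/problem_741_1.py | solution_741_1
-- ===== SOURCE A (Python) =====
-- from typing import List
--
-- def solution_741_1(values: List[int], labels: List[int], num_wanted: int, use_limit: int) -> int:
--     ans = 0
--     freq = {}
--     for value, label in sorted(zip(values, labels), reverse=True):
--         if freq.get(label, 0) < use_limit:
--             ans += value
--             num_wanted -= 1
--             if not num_wanted: break
--             freq[label] = 1 + freq.get(label, 0)
--     return ans
-- ===== SOURCE B (Python) =====
-- from typing import List
--
-- def solution_741_1(values: List[int], labels: List[int], num_wanted: int, use_limit: int) -> int: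
--     table = {}
--     for label, value in zip(labels, values):
--         table[label] = table.get(label, []) + [value]
--     pool = []
--     for vals in table.values():
--         kept = 0
--         for v in sorted(vals, reverse=True):
--             if kept >= use_limit:
--                 break
--             pool.append(v)
--             kept += 1
--     ans = 0
--     for v in sorted(pool, reverse=True):
--         ans += v
--         num_wanted -= 1
--         if not num_wanted:
--             break
--     return ans
-- ===== Notes on version B (the rewrite author's own statement) =====
-- stated objective: alternative
-- what changed: B replaces A's single scan over the globally sorted pairs with an inline per-label frequency dict by a group-by table (label -> its values), per-label descending sort pruned to the first use_limit values into a pool, then a cap-free accumulation over the re-sorted pool; the frequency counter and its inline cap check disappear.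
import Mathlib
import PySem

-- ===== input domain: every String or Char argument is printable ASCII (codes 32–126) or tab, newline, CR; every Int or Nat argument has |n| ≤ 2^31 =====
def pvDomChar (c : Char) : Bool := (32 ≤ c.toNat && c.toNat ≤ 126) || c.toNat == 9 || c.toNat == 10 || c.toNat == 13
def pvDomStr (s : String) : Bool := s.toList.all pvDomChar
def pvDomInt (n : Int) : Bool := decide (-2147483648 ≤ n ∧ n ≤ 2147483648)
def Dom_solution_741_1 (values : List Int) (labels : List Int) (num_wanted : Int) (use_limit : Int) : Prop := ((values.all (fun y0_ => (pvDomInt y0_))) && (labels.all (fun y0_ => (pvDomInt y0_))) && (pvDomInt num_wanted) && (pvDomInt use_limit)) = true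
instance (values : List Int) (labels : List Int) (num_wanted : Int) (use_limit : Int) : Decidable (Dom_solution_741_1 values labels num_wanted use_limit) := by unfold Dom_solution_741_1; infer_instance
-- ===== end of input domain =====

-- B groups values by label, prunes each group to its top use_limit values, and accumulates the
-- re-sorted pool with no per-item cap check; A scans the globally sorted pairs with an inline
-- frequency dict. (objective: alternative)

-- ===== PORT A =====
def loopA (use_limit : Int) : List (Int × Int) → Int → Int → PySem.Dict Int Int → Int
  | [], ans, _, _ => ans
  | (value, label) :: rest, ans, num_wanted, freq =>
    if freq.getD label 0 < use_limit then
      if num_wanted - 1 = 0 then ans + value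
      else loopA use_limit rest (ans + value) (num_wanted - 1) (freq.insert label (1 + freq.getD label 0))
    else loopA use_limit rest ans num_wanted freq

def solution_741_1 (values : List Int) (labels : List Int) (num_wanted : Int) (use_limit : Int) : Int :=
  loopA use_limit (PySem.List.sorted2 (values.zip labels) Prod.fst Prod.snd true) 0 num_wanted PySem.Dict.empty

-- ===== PORT B =====
-- inner per-label loop: append to pool until kept reaches use_limit
def innerB (use_limit : Int) : List Int → List Int → Int → List Int
  | pool, [], _ => pool
  | pool, v :: rest, kept => if kept ≥ use_limit then pool else innerB use_limit (pool ++ [v]) rest (kept + 1)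

def loopB : List Int → Int → Int → Int
  | [], ans, _ => ans
  | v :: rest, ans, num_wanted =>
    if num_wanted - 1 = 0 then ans + v else loopB rest (ans + v) (num_wanted - 1)

def solution_741_1_alt (values : List Int) (labels : List Int) (num_wanted : Int) (use_limit : Int) : Int :=
  let table := (labels.zip values).foldl (fun d p => d.modify p.1 [] fun x => x ++ [p.2]) PySem.Dict.empty
  let pool := table.values.foldl (fun pool vs => innerB use_limit pool (PySem.List.sorted vs (fun x => x) true) 0) []
  loopB (PySem.List.sorted pool (fun x => x) true) 0 num_wanted

-- ===== PRECONDITION & SPEC =====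
def Spec_solution_741_1 (values : List Int) (labels : List Int) (num_wanted : Int) (use_limit : Int) (out : Int) : Prop := out = solution_741_1_alt values labels num_wanted use_limit
instance (values : List Int) (labels : List Int) (num_wanted : Int) (use_limit : Int) (out : Int) : Decidable (Spec_solution_741_1 values labels num_wanted use_limit out) := by unfold Spec_solution_741_1; infer_instance

-- ===== CLAIM (what is proved, stated in full; the proofs are below) =====
def Claim_equal_solution_741_1 : Prop := ∀ (values : List Int) (labels : List Int) (num_wanted : Int) (use_limit : Int), Dom_solution_741_1 values labels num_wanted use_limit → Spec_solution_741_1 values labels num_wanted use_limit (solution_741_1 values labels num_wanted use_limit)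

-- ===== LEMMAS AND PROOFS =====

-- the abstract counter update A's frequency dict performs
def bump (cnt : Int → Int) (l : Int) : Int → Int := fun x => if x = l then cnt l + 1 else cnt x

-- the sequence of values A's scan selects, with the dict replaced by an abstract counter
def selF (L : Int) : List (Int × Int) → (Int → Int) → List Int
  | [], _ => []
  | (v, l) :: r, cnt => if cnt l < L then v :: selF L r (bump cnt l) else selF L r (bump cnt l)

theorem bump_nonneg {cnt : Int → Int} (h : ∀ l, 0 ≤ cnt l) (l x : Int) : 0 ≤ bump cnt l x := by
  unfold bump; split_ifs with hx
  · have := h l; omega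
  · exact h x

-- (1) A's loop equals B's cap-free loop applied to the selected values
theorem loopA_eq_loopB_selF (L : Int) : ∀ (ps : List (Int × Int)) (ans nw : Int)
    (freq : PySem.Dict Int Int) (cnt : Int → Int),
    (∀ l, 0 ≤ cnt l) → (∀ l, freq.getD l 0 = min (cnt l) (max L 0)) →
    loopA L ps ans nw freq = loopB (selF L ps cnt) ans nw := by
  intro ps
  induction ps with
  | nil => intro ans nw freq cnt _ _; simp [loopA, selF, loopB]
  | cons p r ih =>
    obtain ⟨v, l⟩ := p
    intro ans nw freq cnt hnn hinv
    have hcond : (freq.getD l 0 < L) ↔ (cnt l < L) := by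
      rw [hinv l]; have := hnn l; omega
    by_cases hsel : cnt l < L
    · have hf : freq.getD l 0 < L := hcond.mpr hsel
      simp only [loopA, selF, if_pos hf, if_pos hsel, loopB]
      by_cases hb : nw - 1 = 0
      · simp [hb]
      · simp only [if_neg hb]
        apply ih
        · exact bump_nonneg hnn l
        · intro l'
          rw [PySem.Dict.getD_insert]
          unfold bump
          split_ifs with h1
          · rw [hinv l]; have := hnn l; omega
          · exact hinv l'
    · have hf : ¬ freq.getD l 0 < L := fun h => hsel (hcond.mp h)
      simp only [loopA, selF, if_neg hf, if_neg hsel]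
      apply ih
      · exact bump_nonneg hnn l
      · intro l'
        unfold bump
        split_ifs with h1
        · rw [h1, hinv l]; have := hnn l; omega
        · exact hinv l'

-- (2) the selected values form a sublist of the scanned values
theorem selF_sublist (L : Int) : ∀ (ps : List (Int × Int)) (cnt : Int → Int),
    (selF L ps cnt).Sublist (ps.map Prod.fst) := by
  intro ps
  induction ps with
  | nil => intro cnt; simp [selF]
  | cons p r ih =>
    obtain ⟨v, l⟩ := p
    intro cnt
    simp only [selF, List.map_cons]
    split_ifs
    · exact (ih (bump cnt l)).cons₂ v
    · exact (ih (bump cnt l)).cons v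

theorem pv_flatMap_congr {α β : Type} {f g : α → List β} : ∀ {xs : List α},
    (∀ x ∈ xs, f x = g x) → xs.flatMap f = xs.flatMap g := fun h => List.flatMap_congr h

-- (3) multiset characterisation: per label, the selected values are the first (L - cnt) scanned values
theorem selF_perm (L : Int) : ∀ (ps : List (Int × Int)) (cnt : Int → Int) (ls : List Int),
    ls.Nodup → (∀ p ∈ ps, p.2 ∈ ls) →
    (selF L ps cnt).Perm
      (ls.flatMap fun k => List.take (L - cnt k).toNat ((ps.filter (fun p => p.2 == k)).map Prod.fst)) := by
  intro ps
  induction ps with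
  | nil => intro cnt ls _ _; simp [selF]
  | cons p r ih =>
    obtain ⟨v, l⟩ := p
    intro cnt ls hnd hmem
    obtain ⟨a, b, rfl⟩ := List.append_of_mem (hmem (v, l) (by simp))
    obtain ⟨hnda, hndlb, hdisj⟩ := List.nodup_append.mp hnd
    have hla : l ∉ a := fun h => hdisj l h l (by simp) rfl
    have hlb : l ∉ b := (List.nodup_cons.mp hndlb).1
    have hbl : bump cnt l l = cnt l + 1 := by unfold bump; simp
    have hF : ∀ k, k ≠ l →
        List.take (L - cnt k).toNat ((((v, l) :: r).filter (fun p => p.2 == k)).map Prod.fst)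
        = List.take (L - bump cnt l k).toNat ((r.filter (fun p => p.2 == k)).map Prod.fst) := by
      intro k hkl
      have h1 : ((((v, l) : Int × Int)).2 == k) = false := by
        simp only [beq_eq_false_iff_ne]; exact Ne.symm hkl
      have h2 : bump cnt l k = cnt k := by unfold bump; simp [hkl]
      simp only [List.filter_cons, h1, Bool.false_eq_true, if_false, h2]
    have hfl : ((v, l) :: r).filter (fun p => p.2 == l) = (v, l) :: r.filter (fun p => p.2 == l) := by
      simp
    have hsplit :
        ((a ++ l :: b).flatMap fun k => List.take (L - cnt k).toNat ((((v, l) :: r).filter (fun p => p.2 == k)).map Prod.fst))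
        = (a.flatMap fun k => List.take (L - bump cnt l k).toNat ((r.filter (fun p => p.2 == k)).map Prod.fst))
          ++ (List.take (L - cnt l).toNat (v :: (r.filter (fun p => p.2 == l)).map Prod.fst)
          ++ (b.flatMap fun k => List.take (L - bump cnt l k).toNat ((r.filter (fun p => p.2 == k)).map Prod.fst))) := by
      rw [List.flatMap_append, List.flatMap_cons]
      congr 1
      · exact pv_flatMap_congr (fun k hk => hF k (fun h => hla (h ▸ hk)))
      congr 1
      · rw [hfl, List.map_cons]
      · exact pv_flatMap_congr (fun k hk => hF k (fun h => hlb (h ▸ hk)))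
    rw [hsplit]
    have ihr := ih (bump cnt l) (a ++ l :: b) hnd (fun p hp => hmem p (by simp [hp]))
    rw [List.flatMap_append, List.flatMap_cons, hbl] at ihr
    by_cases hsel : cnt l < L
    · have htk : (L - cnt l).toNat = (L - (cnt l + 1)).toNat + 1 := by omega
      rw [htk, List.take_succ_cons]
      simp only [selF, if_pos hsel]
      rw [List.cons_append]
      exact (ihr.cons v).trans List.perm_middle.symm
    · have htk0 : (L - cnt l).toNat = 0 := by omega
      have htk0' : (L - (cnt l + 1)).toNat = 0 := by omega
      rw [htk0, List.take_zero]
      rw [htk0', List.take_zero] at ihr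
      simp only [selF, if_neg hsel]
      exact ihr

-- (4) insertion by an asymmetric transitive 'before' keeps the list pairwise-ordered by it
theorem pairwise_insertBy (before : Int × Int → Int × Int → Bool)
    (htrans : ∀ a b c, before a b = true → before b c = true → before a c = true)
    (hasym : ∀ a b, before a b = true → before b a = false)
    (x : Int × Int) : ∀ (acc : List (Int × Int)),
    acc.Pairwise (fun a b => before b a = false) →
    (PySem.List.insertBy before x acc).Pairwise (fun a b => before b a = false) := by
  intro acc
  induction acc with
  | nil => intro _; simp [PySem.List.insertBy]
  | cons y ys ih =>
    intro h
    rw [List.pairwise_cons] at h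
    obtain ⟨hy, hys⟩ := h
    simp only [PySem.List.insertBy]
    by_cases hb : before x y = true
    · rw [if_pos hb]
      refine List.pairwise_cons.mpr ⟨?_, List.pairwise_cons.mpr ⟨hy, hys⟩⟩
      intro z hz
      rcases List.mem_cons.mp hz with rfl | hz
      · exact hasym x z hb
      · by_cases hzx : before z x = true
        · have h1 := htrans z x y hzx hb
          have h2 := hy z hz
          rw [h1] at h2; cases h2
        · simpa using hzx
    · rw [if_neg hb]
      refine List.pairwise_cons.mpr ⟨?_, ih hys⟩
      intro z hz
      rw [PySem.List.mem_insertBy] at hz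
      rcases hz with rfl | hz
      · simpa using hb
      · exact hy z hz

theorem pairwise_foldl_insertBy (before : Int × Int → Int × Int → Bool)
    (htrans : ∀ a b c, before a b = true → before b c = true → before a c = true)
    (hasym : ∀ a b, before a b = true → before b a = false) :
    ∀ (xs acc : List (Int × Int)), acc.Pairwise (fun a b => before b a = false) →
    (xs.foldl (fun acc x => PySem.List.insertBy before x acc) acc).Pairwise (fun a b => before b a = false) := by
  intro xs
  induction xs with
  | nil => intro acc h; simpa using h
  | cons x r ih =>
    intro acc h
    simpa using ih _ (pairwise_insertBy before htrans hasym x acc h)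

-- (5) the globally sorted pair list has non-increasing first components
theorem sorted2_fst_pairwise (ps : List (Int × Int)) :
    (PySem.List.sorted2 ps Prod.fst Prod.snd true).Pairwise (fun a b => b.1 ≤ a.1) := by
  have h := pairwise_foldl_insertBy
      (fun a b => (decide (b.1 < a.1) || (!decide (a.1 < b.1) && decide (b.2 < a.2))))
      (by intro a b c h1 h2; simp at h1 h2 ⊢; omega)
      (by intro a b h1; simp at h1 ⊢; omega)
      ps [] (by simp)
  have he : PySem.List.sorted2 ps Prod.fst Prod.snd true
      = ps.foldl (fun acc x => PySem.List.insertBy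
          (fun a b => (decide (b.1 < a.1) || (!decide (a.1 < b.1) && decide (b.2 < a.2)))) x acc) [] := by
    simp [PySem.List.sorted2]
  rw [he]
  refine h.imp ?_
  intro a b hb
  simp at hb
  omega

-- (6) the inner per-label loop is a take
theorem innerB_eq (L : Int) : ∀ (vs pool : List Int) (kept : Int),
    innerB L pool vs kept = pool ++ List.take (L - kept).toNat vs := by
  intro vs
  induction vs with
  | nil => intro pool kept; simp [innerB]
  | cons v r ih =>
    intro pool kept
    simp only [innerB]
    by_cases h : kept ≥ L
    · rw [if_pos h]
      have h0 : (L - kept).toNat = 0 := by omega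
      simp [h0]
    · rw [if_neg h]
      have h1 : (L - kept).toNat = (L - (kept + 1)).toNat + 1 := by omega
      rw [ih, h1, List.take_succ_cons, List.append_assoc]
      simp

-- (7) per label: B's sorted group equals the label's slice of the globally sorted list
theorem sorted_group_eq (values labels : List Int) (k : Int) :
    PySem.List.sorted (((labels.zip values).filter (fun p => p.1 == k)).map (fun x => x.2)) (fun x => x) true
      = ((PySem.List.sorted2 (values.zip labels) Prod.fst Prod.snd true).filter (fun p => p.2 == k)).map Prod.fst := by
  have hswap : ((labels.zip values).filter (fun p => p.1 == k)).map (fun x => x.2)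
      = ((values.zip labels).filter (fun p => p.2 == k)).map Prod.fst := by
    rw [← List.zip_swap values labels, List.filter_map, List.map_map]
    simp [Function.comp_def, Prod.swap]
  have hperm : (PySem.List.sorted (((labels.zip values).filter (fun p => p.1 == k)).map (fun x => x.2)) (fun x => x) true).Perm
      (((PySem.List.sorted2 (values.zip labels) Prod.fst Prod.snd true).filter (fun p => p.2 == k)).map Prod.fst) := by
    refine (PySem.List.sorted_perm _ _ _).trans ?_
    rw [hswap]
    exact (((PySem.List.sorted2_perm (values.zip labels) Prod.fst Prod.snd true).filter _).map _).symm
  have hp1 : (PySem.List.sorted (((labels.zip values).filter (fun p => p.1 == k)).map (fun x => x.2)) (fun x => x) true).Pairwise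
      (fun a b : Int => b ≤ a) := PySem.List.sorted_pairwise_rev _ _
  have hp2 : (((PySem.List.sorted2 (values.zip labels) Prod.fst Prod.snd true).filter (fun p => p.2 == k)).map Prod.fst).Pairwise
      (fun a b : Int => b ≤ a) := by
    refine List.Pairwise.sublist (List.Sublist.map Prod.fst List.filter_sublist) ?_
    rw [List.pairwise_map]
    exact sorted2_fst_pairwise (values.zip labels)
  exact List.eq_of_perm_of_sorted (fun a b _ _ h1 h2 => le_antisymm h2 h1) hp1 hp2 hperm

-- (8) the selected values are the sorted pool
theorem selF_eq_sorted_pool (values labels : List Int) (L : Int) :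
    selF L (PySem.List.sorted2 (values.zip labels) Prod.fst Prod.snd true) (fun _ => 0)
      = PySem.List.sorted
          (((labels.zip values).foldl (fun d p => d.modify p.1 [] fun x => x ++ [p.2]) PySem.Dict.empty).values.foldl
            (fun pool vs => innerB L pool (PySem.List.sorted vs (fun x => x) true) 0) [])
          (fun x => x) true := by
  set S := PySem.List.sorted2 (values.zip labels) Prod.fst Prod.snd true with hSdef
  set table := (labels.zip values).foldl (fun d p => d.modify p.1 [] fun x => x ++ [p.2]) PySem.Dict.empty with htdef
  have hkeys : table.keys = PySem.Set.ofList ((labels.zip values).map (fun p => p.1)) := by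
    rw [htdef, PySem.Dict.keys_foldl_modify_key ((labels.zip values)) (fun p => p.1) [] (fun _ p => fun xs => xs ++ [p.2]) PySem.Dict.empty,
      PySem.Dict.keys_empty]
    rfl
  have hnodup : table.keys.Nodup := by
    rw [htdef]
    exact PySem.Dict.nodup_keys_foldl_modify_key (labels.zip values) (fun p : Int × Int => p.1) []
      (fun _ p => fun xs => xs ++ [p.2]) PySem.Dict.empty PySem.Dict.nodup_keys_empty
  have hgetD : ∀ k, table.getD k [] = ((labels.zip values).filter (fun p => p.1 == k)).map (fun x => x.2) := by
    intro k
    rw [htdef, PySem.Dict.getD_foldl_modify_append, PySem.Dict.getD_empty, List.nil_append]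
  have hpool : table.values.foldl (fun pool vs => innerB L pool (PySem.List.sorted vs (fun x => x) true) 0) []
      = table.keys.flatMap (fun k => List.take (L - 0).toNat ((S.filter (fun p => p.2 == k)).map Prod.fst)) := by
    have h1 : ∀ (acc : List Int), table.values.foldl (fun pool vs => innerB L pool (PySem.List.sorted vs (fun x => x) true) 0) acc
        = table.values.foldl (fun pool vs => pool ++ List.take (L - 0).toNat (PySem.List.sorted vs (fun x => x) true)) acc := by
      intro acc
      congr 1
      funext pool vs
      exact innerB_eq L _ pool 0
    rw [h1, PySem.List.foldl_append_eq_flatMap, List.nil_append,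
      PySem.Dict.values_eq_map_keys table hnodup [], List.flatMap_map]
    refine List.flatMap_congr ?_
    intro k _
    rw [hgetD k, sorted_group_eq values labels k]
  have hmem : ∀ p ∈ S, p.2 ∈ table.keys := by
    intro p hp
    have hp' : p ∈ values.zip labels := (PySem.List.sorted2_perm (values.zip labels) Prod.fst Prod.snd true).mem_iff.mp hp
    rw [hkeys, PySem.Set.mem_ofList]
    rw [← List.zip_swap values labels, List.map_map]
    refine List.mem_map.mpr ⟨p, hp', rfl⟩
  have hperm : (selF L S (fun _ => 0)).Perm
      (PySem.List.sorted (table.values.foldl (fun pool vs => innerB L pool (PySem.List.sorted vs (fun x => x) true) 0) []) (fun x => x) true) := by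
    refine (selF_perm L S (fun _ => 0) table.keys hnodup hmem).trans ?_
    rw [← hpool]
    exact (PySem.List.sorted_perm _ _ _).symm
  have hp1 : (selF L S (fun _ => 0)).Pairwise (fun a b : Int => b ≤ a) := by
    refine List.Pairwise.sublist (selF_sublist L S (fun _ => 0)) ?_
    rw [List.pairwise_map]
    exact sorted2_fst_pairwise (values.zip labels)
  have hp2 : (PySem.List.sorted (table.values.foldl (fun pool vs => innerB L pool (PySem.List.sorted vs (fun x => x) true) 0) []) (fun x => x) true).Pairwise
      (fun a b : Int => b ≤ a) := PySem.List.sorted_pairwise_rev _ _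
  exact List.eq_of_perm_of_sorted (fun a b _ _ h1 h2 => le_antisymm h2 h1) hp1 hp2 hperm

theorem solution_741_1_eq_alt (values labels : List Int) (num_wanted use_limit : Int) :
    solution_741_1 values labels num_wanted use_limit
      = solution_741_1_alt values labels num_wanted use_limit := by
  unfold solution_741_1 solution_741_1_alt
  rw [loopA_eq_loopB_selF use_limit _ 0 num_wanted PySem.Dict.empty (fun _ => 0)
    (fun _ => le_refl 0)
    (by intro l; rw [PySem.Dict.getD_empty]; show (0 : Int) = min 0 (max use_limit 0); omega)]
  rw [selF_eq_sorted_pool values labels use_limit]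

-- ===== VERDICT (by name: the statement is the Claim_ definition above) =====
theorem solution_741_1_spec : Claim_equal_solution_741_1 := by
  intro values labels num_wanted use_limit _
  unfold Spec_solution_741_1
  exact solution_741_1_eq_alt values labels num_wanted use_limit
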